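-- pv_equiv track=rewrite | github.com/TalGb123/CollegeProjects | Semester2/TCB/Python And Cryptography (Advanced)/ClassWork/Answers/cw10.py | Q5
-- ===== SOURCE A (Python) =====
-- def Q5(text, num):
--       table = [[] for _ in range(num)]
--       for i in range(num):
--             table[i] = text[i::num]
--       newtext = ''
--       for i in table:
--             newtext += ''.join(i)
--       return newtext
-- ===== SOURCE B (Python) =====
-- def Q5(text, num):
--     if num <= 0:
--         return text[:0]
--     buckets = [[] for _ in range(num)]
--     for i, ch in enumerate(text):
--         buckets[i % num].append(ch)
--     return ''.join(''.join(b) for b in buckets)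
-- ===== Notes on version B (the rewrite author's own statement) =====
-- stated objective: alternative
-- what changed: B replaces A's num strided slices text[i::num] (each a separate strided scan, then joined) by a single sequential pass that distributes each character into bucket i % num, then joins the buckets.
import Mathlib
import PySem

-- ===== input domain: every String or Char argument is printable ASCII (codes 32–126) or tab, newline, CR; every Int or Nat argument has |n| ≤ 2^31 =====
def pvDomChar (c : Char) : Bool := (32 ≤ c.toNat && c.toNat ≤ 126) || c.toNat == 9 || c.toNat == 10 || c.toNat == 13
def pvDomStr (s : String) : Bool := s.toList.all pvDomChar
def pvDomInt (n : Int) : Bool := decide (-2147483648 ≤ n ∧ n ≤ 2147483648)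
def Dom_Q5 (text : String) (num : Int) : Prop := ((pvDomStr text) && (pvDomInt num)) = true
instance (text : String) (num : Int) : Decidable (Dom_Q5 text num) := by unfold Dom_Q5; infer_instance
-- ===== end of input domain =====

-- B replaces A's num strided slices text[i::num] by one sequential pass distributing each
-- character into bucket i % num and then joining the buckets (alternative decomposition, same cost).


-- ===== PORT A =====
-- table[i] = text[i::num] for i in range(num); then newtext += ''.join(table[i]).
-- (inside the loop num ≥ 1, so the slice never raises; .getD [] is the dead default)
def Q5 (text : String) (num : Int) : String :=
  let cs := text.toList
  let table : List (List Char) :=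
    (PySem.List.pyRange 0 num 1).map (fun i => (PySem.List.slice? cs (some i) none num).getD [])
  String.ofList (table.foldl (fun acc row => acc ++ row) [])

-- ===== PORT B =====
-- if num <= 0: return text[:0]; else one pass over enumerate(text), appending each char to
-- bucket[i % num]; finally join the buckets in order.
def Q5_alt (text : String) (num : Int) : String :=
  if num ≤ 0 then "" else
    let buckets : List (List Char) :=
      (PySem.List.enumerate text.toList).foldl
        (fun bs p =>
          bs.set (PySem.Int.mod p.1 num).toNat ((bs.getD (PySem.Int.mod p.1 num).toNat []) ++ [p.2]))
        (List.replicate num.toNat [])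
    String.ofList (buckets.foldl (fun acc b => acc ++ b) [])

-- ===== PRECONDITION & SPEC =====
def Spec_Q5 (text : String) (num : Int) (out : String) : Prop := out = Q5_alt text num
instance (text : String) (num : Int) (out : String) : Decidable (Spec_Q5 text num out) := by unfold Spec_Q5; infer_instance

-- ===== CLAIM (what is proved, stated in full; the proofs are below) =====
def Claim_equal_Q5 : Prop := ∀ (text : String) (num : Int), Dom_Q5 text num → Spec_Q5 text num (Q5 text num)

-- ===== LEMMAS AND PROOFS =====

-- the characters of cs sitting at positions ≡ i (mod n), in order: the common spec of
-- A's slice text[i::num] (lemma slice_eq_bucket) and B's bucket number i (lemma fold_eq_buckets)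
def bucketIdx (n : Nat) (cs : List Char) (i : Nat) : List Char :=
  (List.range cs.length).filterMap (fun k => if k % n = i then cs[k]? else none)

lemma filterMap_ite {α : Type} (p : Nat → Prop) [DecidablePred p] (f : Nat → Option α) (l : List Nat) :
    l.filterMap (fun k => if p k then f k else none) = (l.filter (fun k => decide (p k))).filterMap f := by
  induction l with
  | nil => rfl
  | cons x xs ih => by_cases h : p x <;> simp [List.filterMap_cons, h, ih]

-- the indices < len that are ≡ i (mod n) are exactly i + n*k for k < ⌈(len - i)/n⌉
lemma filter_mod (n i len : Nat) (hn : 0 < n) (hi : i < n) :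
    (List.range len).filter (fun k => decide (k % n = i)) =
      (List.range ((len - i + n - 1) / n)).map (fun k => i + n * k) := by
  induction len with
  | zero => simp; omega
  | succ len ih =>
    rw [List.range_succ, List.filter_append, ih]
    by_cases hli : len < i
    · have h1 : len % n = len := Nat.mod_eq_of_lt (by omega)
      have h2 : len + 1 - i + n - 1 = len - i + n - 1 := by omega
      simp [h2, h1]; omega
    · rw [Nat.not_lt] at hli
      obtain ⟨q, r, hqr, hrn⟩ : ∃ q r, len - i = n * q + r ∧ r < n :=
        ⟨(len - i) / n, (len - i) % n, (Nat.div_add_mod _ _).symm, Nat.mod_lt _ hn⟩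
      have hc1 : len - i + n - 1 = n * q + (r + n - 1) := by omega
      have hc2 : len + 1 - i + n - 1 = n * q + (r + n) := by omega
      rw [hc1, hc2, Nat.mul_add_div hn, Nat.mul_add_div hn]
      by_cases hr : r = 0
      · subst hr
        have hmod : len % n = i := by
          have hl : len = i + n * q := by omega
          rw [hl, Nat.add_mul_mod_self_left, Nat.mod_eq_of_lt hi]
        have e1 : (0 + n - 1) / n = 0 := Nat.div_eq_of_lt (by omega)
        have e2 : (0 + n) / n = 1 := by simp [Nat.div_self hn]
        rw [e1, e2, List.range_succ, List.map_append]
        simp [hmod]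
        omega
      · have e1 : (r + n - 1) / n = 1 := Nat.div_eq_of_lt_le (by omega) (by omega)
        have e2 : (r + n) / n = 1 := Nat.div_eq_of_lt_le (by omega) (by omega)
        have hmod : len % n ≠ i := by
          have hl : len = (i + r) + n * q := by omega
          rw [hl, Nat.add_mul_mod_self_left]
          rcases Nat.lt_or_ge (i + r) n with h | h
          · rw [Nat.mod_eq_of_lt h]; omega
          · rw [Nat.mod_eq_sub_mod h, Nat.mod_eq_of_lt (by omega)]; omega
        rw [e1, e2]
        simp [hmod]

-- A's slice text[i::n] is bucket i
lemma slice_eq_bucket (cs : List Char) (n i : Nat) (hn : 0 < n) (hi : i < n) :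
    PySem.List.slice? cs (some (i : Int)) none (n : Int) = some (bucketIdx n cs i) := by
  have h1 : ¬ ((n : Int) < 0) := by omega
  have h2 : (0 : Int) < n := by omega
  have h3 : ¬ ((i : Int) < 0) := by omega
  simp only [PySem.List.slice?, PySem.List.sliceIndices, if_neg h1, if_pos h2, if_neg h3,
    if_neg (by omega : ¬ ((n : Int) = 0))]
  rcases Nat.lt_or_ge i cs.length with hil | hil
  · have hmin : min (↑i) (↑cs.length : Int) = ↑i := by omega
    rw [hmin, if_pos (by omega : (↑i : Int) < ↑cs.length)]
    have hcast : (↑cs.length - ↑i + ↑n - 1 : Int) = ((cs.length - i + n - 1 : Nat) : Int) := by omega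
    have hcnt : ((↑cs.length - ↑i + ↑n - 1 : Int) / ↑n).toNat = (cs.length - i + n - 1) / n := by
      rw [hcast, Int.ofNat_ediv_ofNat, Int.toNat_natCast]
    rw [hcnt]
    unfold bucketIdx
    rw [filterMap_ite, filter_mod n i cs.length hn hi, List.filterMap_map]
    refine congrArg some (List.filterMap_congr ?_)
    intro x hx
    have h : ((i : Int) + ↑n * ↑x) = ((i + n * x : Nat) : Int) := by push_cast; ring
    rw [h, Int.toNat_natCast]
    rfl
  · have hmin : min (↑i) (↑cs.length : Int) = ↑cs.length := by omega
    rw [hmin, if_neg (by omega : ¬ ((↑cs.length : Int) < ↑cs.length))]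
    simp only [List.range_zero, List.filterMap_nil]
    congr 1
    symm
    unfold bucketIdx
    apply List.filterMap_eq_nil_iff.mpr
    intro k hk
    have hklen : k < cs.length := List.mem_range.mp hk
    rw [if_neg]
    rw [Nat.mod_eq_of_lt (by omega)]
    omega

lemma bucketIdx_append (n : Nat) (cs : List Char) (c : Char) (i : Nat) :
    bucketIdx n (cs ++ [c]) i =
      bucketIdx n cs i ++ (if cs.length % n = i then [c] else []) := by
  unfold bucketIdx
  rw [List.length_append, List.length_singleton, List.range_succ, List.filterMap_append]
  congr 1
  · apply List.filterMap_congr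
    intro k hk
    rw [List.getElem?_append_left (List.mem_range.mp hk)]
  · by_cases hm : cs.length % n = i <;> simp [hm]

lemma map_range_set (n : Nat) (f : Nat → List Char) (j : Nat) (v : List Char) :
    ((List.range n).map f).set j v = (List.range n).map (fun i => if i = j then v else f i) := by
  apply List.ext_getElem (by simp)
  intro k h1 h2
  simp only [List.getElem_set, List.getElem_map, List.getElem_range]
  split_ifs with hx hy hy
  · rfl
  · omega
  · omega
  · rfl

-- B's fold builds exactly the buckets
lemma fold_eq_buckets (cs : List Char) (n : Nat) (hn : 0 < n) :
    (PySem.List.enumerate cs).foldl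
        (fun bs p =>
          bs.set (PySem.Int.mod p.1 (n : Int)).toNat
            ((bs.getD (PySem.Int.mod p.1 (n : Int)).toNat []) ++ [p.2]))
        (List.replicate n []) =
      (List.range n).map (bucketIdx n cs) := by
  induction cs using List.reverseRecOn with
  | nil =>
    rw [PySem.List.enumerate_nil, List.foldl_nil]
    apply List.ext_getElem (by simp)
    intro k h1 h2
    simp [bucketIdx]
  | append_singleton cs c ih =>
    rw [PySem.List.enumerate_append, List.foldl_append, ih,
      PySem.List.enumerate_cons, PySem.List.enumerate_nil, List.foldl_cons, List.foldl_nil]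
    have hj : cs.length % n < n := Nat.mod_lt _ hn
    have hmod : (PySem.Int.mod ((0 : Int) + ↑cs.length) ↑n).toNat = cs.length % n := by
      rw [Int.zero_add, PySem.Int.mod_natCast, Int.toNat_natCast]
    rw [hmod]
    have hget : ((List.range n).map (bucketIdx n cs)).getD (cs.length % n) [] =
        bucketIdx n cs (cs.length % n) := by
      simp [List.getD, hj]
    rw [hget, map_range_set]
    apply List.map_congr_left
    intro i hi
    rw [bucketIdx_append]
    by_cases h : i = cs.length % n
    · subst h; simp
    · rw [if_neg h, if_neg (fun hh => h hh.symm), List.append_nil]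

-- ===== VERDICT (by name: the statement is the Claim_ definition above) =====
theorem Q5_spec : Claim_equal_Q5 := by
  intro text num _
  unfold Spec_Q5 Q5 Q5_alt
  by_cases hle : num ≤ 0
  · have hr : PySem.List.pyRange 0 num 1 = [] := by
      simp [PySem.List.pyRange]; omega
    simp [hle, hr]
  · have hn0 : 0 < num := by omega
    have hn : num = ((num.toNat : Nat) : Int) := by omega
    set n := num.toNat with hndef
    have hnpos : 0 < n := by omega
    rw [hn]
    simp only [if_neg (by omega : ¬ ((n : Int) ≤ 0))]
    rw [PySem.List.pyRange_zero_natCast, List.map_map, fold_eq_buckets text.toList n hnpos]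
    congr 2
    apply List.map_congr_left
    intro i hi
    have hi' : i < n := List.mem_range.mp hi
    simp [Function.comp, slice_eq_bucket text.toList n i hnpos hi']
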